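-- pv_equiv track=rewrite | github.com/wei12314/my_work | data_handle/test_dataset.py | filter_by_turn
-- ===== SOURCE A (Python) =====
-- def filter_by_turn(example):
--     dialogue = example["conversation"]
--     turn = []
--     for d in dialogue:
--         turn.append(d['role'])
--
--     if len(turn) % 2 != 0:
--         return False
--
--     for i, t in enumerate(turn):
--         if (i % 2) == 0:
--             if t != 'user':
--                 return False
--         else:
--             if t != 'assistant':
--                 return False
--     return True
-- ===== SOURCE B (Python) =====
-- def filter_by_turn(example):
--     roles = [d['role'] for d in example["conversation"]]
--     return roles == ["user", "assistant"] * (len(roles) // 2)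
-- ===== Notes on version B (the rewrite author's own statement) =====
-- stated objective: simpler
-- what changed: B compares the role list structurally against the generated canonical pattern ['user','assistant']*(n//2), replacing A's even-length modulo check plus per-index parity branching; oddness is subsumed by the length mismatch.
import Mathlib
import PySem

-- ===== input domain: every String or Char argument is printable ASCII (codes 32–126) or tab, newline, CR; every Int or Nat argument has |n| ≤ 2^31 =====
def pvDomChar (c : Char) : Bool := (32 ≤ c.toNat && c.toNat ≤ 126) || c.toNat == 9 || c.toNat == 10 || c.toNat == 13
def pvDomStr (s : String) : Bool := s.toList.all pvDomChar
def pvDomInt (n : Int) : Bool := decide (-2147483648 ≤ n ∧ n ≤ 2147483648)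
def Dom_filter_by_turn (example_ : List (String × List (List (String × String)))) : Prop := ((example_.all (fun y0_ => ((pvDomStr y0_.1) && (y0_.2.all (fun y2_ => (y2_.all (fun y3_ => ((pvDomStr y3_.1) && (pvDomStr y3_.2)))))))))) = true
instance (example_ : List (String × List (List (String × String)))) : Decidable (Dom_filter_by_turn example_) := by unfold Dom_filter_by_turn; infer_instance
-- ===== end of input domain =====

-- ===== PORT A =====
-- A's per-index loop: i is the running index from enumerate(turn)
def filterAuxA : Nat → List String → Bool
  | _, [] => true
  | i, t :: rest =>
    if i % 2 == 0 then
      if t != "user" then false else filterAuxA (i + 1) rest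
    else
      if t != "assistant" then false else filterAuxA (i + 1) rest

def filter_by_turn (example_ : List (String × List (List (String × String)))) : Bool :=
  let dialogue := (PySem.Dict.get? (PySem.Dict.mk example_) "conversation").getD []
  let turn := dialogue.map (fun d => (PySem.Dict.get? (PySem.Dict.mk d) "role").getD "")
  if turn.length % 2 != 0 then false
  else filterAuxA 0 turn

-- ===== PORT B =====
def filter_by_turn_alt (example_ : List (String × List (List (String × String)))) : Bool :=
  let roles := ((PySem.Dict.get? (PySem.Dict.mk example_) "conversation").getD []).map
      (fun d => (PySem.Dict.get? (PySem.Dict.mk d) "role").getD "")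
  roles == (List.replicate (roles.length / 2) ["user", "assistant"]).flatten

-- ===== PRECONDITION & SPEC =====
-- Pre_ excludes exactly the inputs on which Python A raises KeyError: a missing
-- "conversation" key, or a dialogue entry without a "role" key.
def Pre_filter_by_turn (example_ : List (String × List (List (String × String)))) : Prop :=
  (PySem.Dict.get? (PySem.Dict.mk example_) "conversation").isSome = true ∧
  ∀ d ∈ (PySem.Dict.get? (PySem.Dict.mk example_) "conversation").getD [],
    (PySem.Dict.get? (PySem.Dict.mk d) "role").isSome = true
instance (example_ : List (String × List (List (String × String)))) : Decidable (Pre_filter_by_turn example_) := by unfold Pre_filter_by_turn; infer_instance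
def pvWitness_filter_by_turn : (List (String × List (List (String × String)))) :=
  [("conversation", [[("role", "user"), ("content", "hi")], [("role", "assistant"), ("content", "yo")]])]
def Spec_filter_by_turn (example_ : List (String × List (List (String × String)))) (out : Bool) : Prop := out = filter_by_turn_alt example_
instance (example_ : List (String × List (List (String × String)))) (out : Bool) : Decidable (Spec_filter_by_turn example_ out) := by unfold Spec_filter_by_turn; infer_instance

-- ===== CLAIM (what is proved, stated in full; the proofs are below) =====
def Claim_equal_filter_by_turn : Prop := ∀ (example_ : List (String × List (List (String × String)))), Dom_filter_by_turn example_ → Pre_filter_by_turn example_ → Spec_filter_by_turn example_ (filter_by_turn example_)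

-- ===== LEMMAS AND PROOFS =====

theorem filterAuxA_parity (ts : List String) (i : Nat) :
    filterAuxA (i + 2) ts = filterAuxA i ts := by
  induction ts generalizing i with
  | nil => rfl
  | cons t rest ih =>
    have h : (i + 2) % 2 = i % 2 := by omega
    simp only [filterAuxA, h]
    rw [show i + 2 + 1 = (i + 1) + 2 from rfl, ih]

theorem filterAuxA_key (ts : List String) :
    (if ts.length % 2 != 0 then false else filterAuxA 0 ts)
      = (ts == (List.replicate (ts.length / 2) ["user", "assistant"]).flatten) := by
  match ts with
  | [] => rfl
  | [t] => simp
  | t :: u :: rest =>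
    have ih := filterAuxA_key rest
    have hmod : (rest.length + 1 + 1) % 2 = rest.length % 2 := by omega
    have hdiv : (rest.length + 1 + 1) / 2 = rest.length / 2 + 1 := by omega
    simp only [List.length_cons, hmod, hdiv, List.replicate_succ, List.flatten_cons]
    show _ = ((t :: u :: rest) == "user" :: "assistant" :: (List.replicate (rest.length / 2) ["user", "assistant"]).flatten)
    by_cases ht : t = "user" <;> by_cases hu : u = "assistant" <;>
      simp [filterAuxA, ht, hu, filterAuxA_parity rest 0, ← ih]
termination_by ts.length

-- ===== VERDICT (by name: the statement is the Claim_ definition above) =====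
theorem filter_by_turn_spec : Claim_equal_filter_by_turn := by
  intro example_ _ _
  unfold Spec_filter_by_turn filter_by_turn filter_by_turn_alt
  exact filterAuxA_key _
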